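-- pv_equiv track=rewrite | github.com/automl/neps | neps_examples/basic_usage/scaling_study.py | get_number_of_parameters
-- ===== SOURCE A (Python) =====
-- def _get_layer_widths(max_units, n_layers):
--     """Reconstructs the funnel shape: [input, L1, L2, ..., output]"""
--     widths = []
--
--     current_width = max_units
--
--     # LCBench Funnel Strategy: Halve width each layer, but keep >= 16 or num_classes
--     for _ in range(n_layers):
--         widths.append(current_width)
--         current_width = max(16, int(current_width / 2))
--     # ignore params in last layer
--     # widths.append(self.num_classes)
--     return widths
--
-- def get_number_of_parameters(epoch, n_layers, max_units):
--     """Calculates total trainable parameters (Weights + Biases)."""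
--     widths = _get_layer_widths(max_units, n_layers)
--     total_params = 0
--
--     for i in range(len(widths) - 1):
--         n_in = widths[i]
--         n_out = widths[i+1]
--
--         # Linear Layer: Weights + Biases
--         weights = n_in * n_out
--         biases = n_out
--         total_params += weights + biases
--     return total_params
-- ===== SOURCE B (Python) =====
-- def get_number_of_parameters(epoch, n_layers, max_units):
--     """Calculates total trainable parameters (Weights + Biases)."""
--     total = 0
--     prev = max_units
--     for _ in range(n_layers - 1):
--         cur = max(16, int(prev / 2))
--         total += prev * cur + cur
--         prev = cur
--     return total
-- ===== Notes on version B (the rewrite author's own statement) =====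
-- stated objective: simpler
-- what changed: Removed the _get_layer_widths helper and the intermediate widths list plus index-based summing pass; a single accumulating loop of n_layers-1 steps carries (prev, total) directly.
import Mathlib
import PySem

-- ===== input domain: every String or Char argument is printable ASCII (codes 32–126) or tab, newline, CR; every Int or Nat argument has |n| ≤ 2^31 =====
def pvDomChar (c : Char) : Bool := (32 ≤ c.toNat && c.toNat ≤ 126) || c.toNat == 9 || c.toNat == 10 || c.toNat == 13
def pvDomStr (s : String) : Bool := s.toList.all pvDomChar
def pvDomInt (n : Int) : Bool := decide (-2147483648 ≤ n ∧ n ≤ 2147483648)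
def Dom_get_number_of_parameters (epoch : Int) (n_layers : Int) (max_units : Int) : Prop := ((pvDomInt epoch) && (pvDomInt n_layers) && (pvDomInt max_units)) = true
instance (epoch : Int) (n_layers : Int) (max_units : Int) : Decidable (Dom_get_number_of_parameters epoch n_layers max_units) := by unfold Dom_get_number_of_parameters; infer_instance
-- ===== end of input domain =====

-- B fuses A's two passes (build the widths list, then sum over adjacent index pairs)
-- into one accumulating loop with no intermediate list: objective 'simpler'.
-- Note: Python's int(w / 2) truncates toward zero, which is Int.tdiv (exact for |w| ≤ 2^31).

-- ===== PORT A =====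
-- _get_layer_widths: append-loop building the widths list, halving (trunc toward zero)
-- each step with floor 16; an Array mirrors the Python list (O(1) append and index).
def pvWidthsGo (widths : Array Int) (current_width : Int) (n : Nat) : Array Int :=
  match n with
  | 0 => widths
  | n + 1 => pvWidthsGo (widths.push current_width) (max 16 (current_width.tdiv 2)) n

def pvGetLayerWidths (max_units : Int) (n_layers : Int) : Array Int :=
  pvWidthsGo #[] max_units n_layers.toNat

def get_number_of_parameters (epoch : Int) (n_layers : Int) (max_units : Int) : Int :=
  let widths := pvGetLayerWidths max_units n_layers
  (List.range (widths.size - 1)).foldl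
    (fun total_params i =>
      let n_in := widths.getD i 0
      let n_out := widths.getD (i + 1) 0
      total_params + (n_in * n_out + n_out)) 0

-- ===== PORT B =====
def pvAltLoop (prev : Int) (total : Int) (n : Nat) : Int :=
  match n with
  | 0 => total
  | n + 1 =>
    let cur := max 16 (prev.tdiv 2)
    pvAltLoop cur (total + (prev * cur + cur)) n

def get_number_of_parameters_alt (epoch : Int) (n_layers : Int) (max_units : Int) : Int :=
  pvAltLoop max_units 0 (n_layers - 1).toNat

-- ===== PRECONDITION & SPEC =====
def Spec_get_number_of_parameters (epoch : Int) (n_layers : Int) (max_units : Int) (out : Int) : Prop := out = get_number_of_parameters_alt epoch n_layers max_units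
instance (epoch : Int) (n_layers : Int) (max_units : Int) (out : Int) : Decidable (Spec_get_number_of_parameters epoch n_layers max_units out) := by unfold Spec_get_number_of_parameters; infer_instance

-- ===== CLAIM (what is proved, stated in full; the proofs are below) =====
def Claim_equal_get_number_of_parameters : Prop := ∀ (epoch : Int) (n_layers : Int) (max_units : Int), Dom_get_number_of_parameters epoch n_layers max_units → Spec_get_number_of_parameters epoch n_layers max_units (get_number_of_parameters epoch n_layers max_units)

-- ===== LEMMAS AND PROOFS =====

-- proof-side list model of the widths array
def pvWList (current_width : Int) (n : Nat) : List Int :=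
  match n with
  | 0 => []
  | n + 1 => current_width :: pvWList (max 16 (current_width.tdiv 2)) n

theorem pvWidthsGo_toList (n : Nat) (acc : Array Int) (w : Int) :
    (pvWidthsGo acc w n).toList = acc.toList ++ pvWList w n := by
  induction n generalizing acc w with
  | zero => simp [pvWidthsGo, pvWList]
  | succ n ih => simp [pvWidthsGo, pvWList, ih]

theorem pvArr_getD (a : Array Int) (i : Nat) (d : Int) :
    a.getD i d = a.toList.getD i d := by
  simp only [Array.getD, List.getD]
  rcases Nat.lt_or_ge i a.size with h | h
  · rw [dif_pos h, List.getElem?_eq_getElem (by simpa using h)]; simp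
  · rw [dif_neg (by omega), List.getElem?_eq_none (by simpa using h)]; simp

-- A's index-based sum over adjacent pairs, rewritten as structural recursion on the list.
def pvPairSum (l : List Int) (acc : Int) : Int :=
  match l with
  | x :: y :: t => pvPairSum (y :: t) (acc + (x * y + y))
  | _ => acc

theorem pvIdxFold_eq_pairSum (l : List Int) (acc : Int) :
    (List.range (l.length - 1)).foldl
      (fun total i => total + (l.getD i 0 * l.getD (i + 1) 0 + l.getD (i + 1) 0)) acc
      = pvPairSum l acc := by
  induction l generalizing acc with
  | nil => simp [pvPairSum]
  | cons x t ih =>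
    match t with
    | [] => simp [pvPairSum]
    | y :: t' =>
      have h : (x :: y :: t').length - 1 = (t'.length + 1) := by simp
      rw [h, List.range_succ_eq_map]
      simp only [List.foldl_cons, List.foldl_map, List.getD_cons_zero, List.getD_cons_succ]
      have := ih (acc := acc + (x * y + y))
      simpa [pvPairSum] using this

theorem pvPairSum_widths (n : Nat) (w acc : Int) :
    pvPairSum (pvWList w (n + 1)) acc = pvAltLoop w acc n := by
  induction n generalizing w acc with
  | zero => simp [pvWList, pvPairSum, pvAltLoop]
  | succ n ih =>
    show pvPairSum (w :: pvWList (max 16 (w.tdiv 2)) (n + 1)) acc = _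
    rw [show pvWList (max 16 (w.tdiv 2)) (n + 1)
        = max 16 (w.tdiv 2) :: pvWList (max 16 ((max 16 (w.tdiv 2)).tdiv 2)) n from rfl]
    simp only [pvPairSum, pvAltLoop]
    rw [show (max 16 (w.tdiv 2) :: pvWList (max 16 ((max 16 (w.tdiv 2)).tdiv 2)) n)
        = pvWList (max 16 (w.tdiv 2)) (n + 1) from rfl]
    exact ih _ _

-- ===== VERDICT (by name: the statement is the Claim_ definition above) =====
theorem get_number_of_parameters_spec : Claim_equal_get_number_of_parameters := by
  intro epoch n_layers max_units _
  show _ = _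
  unfold get_number_of_parameters get_number_of_parameters_alt pvGetLayerWidths
  simp only [pvArr_getD, pvWidthsGo_toList, Array.size_eq_length_toList, List.nil_append]
  rw [pvIdxFold_eq_pairSum]
  rcases h : n_layers.toNat with _ | k
  · have h1 : (n_layers - 1).toNat = 0 := by omega
    rw [h1]; simp [pvWList, pvPairSum, pvAltLoop]
  · have h1 : (n_layers - 1).toNat = k := by omega
    rw [h1]; exact pvPairSum_widths k max_units 0
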